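-- pv_equiv track=rewrite | github.com/Khim3/Sudoku_Solver_DSA_Project | DLX.py | exact_cover_to_sudoku
-- ===== SOURCE A (Python) =====
-- def exact_cover_to_sudoku(solution):
--     board = ['0'] * 81
--     for r in solution:
--         row = r // 81
--         col = (r % 81) // 9
--         num = (r % 9) + 1
--         board[row * 9 + col] = str(num)
--     return ''.join(board)
-- ===== SOURCE B (Python) =====
-- def exact_cover_to_sudoku(solution):
--     # no board table at all: for each of the 81 cells, scan the solution
--     # backwards for the last row that lands on that cell (last-write-wins,
--     # matching A's overwriting scatter) and emit its digit, else '0'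
--     def digit(i):
--         for r in reversed(solution):
--             if r // 9 == i:
--                 return str(r % 9 + 1)
--         return '0'
--     return ''.join(map(digit, range(81)))
-- ===== Notes on version B (the rewrite author's own statement) =====
-- stated objective: alternative
-- what changed: A makes one scatter pass that mutates a preallocated 81-slot list; B keeps no board at all and instead, for each of the 81 cell positions, does a backward linear scan of the solution for the last row hitting that cell (gather with nested scan), trading the table for extra scanning.
import Mathlib
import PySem

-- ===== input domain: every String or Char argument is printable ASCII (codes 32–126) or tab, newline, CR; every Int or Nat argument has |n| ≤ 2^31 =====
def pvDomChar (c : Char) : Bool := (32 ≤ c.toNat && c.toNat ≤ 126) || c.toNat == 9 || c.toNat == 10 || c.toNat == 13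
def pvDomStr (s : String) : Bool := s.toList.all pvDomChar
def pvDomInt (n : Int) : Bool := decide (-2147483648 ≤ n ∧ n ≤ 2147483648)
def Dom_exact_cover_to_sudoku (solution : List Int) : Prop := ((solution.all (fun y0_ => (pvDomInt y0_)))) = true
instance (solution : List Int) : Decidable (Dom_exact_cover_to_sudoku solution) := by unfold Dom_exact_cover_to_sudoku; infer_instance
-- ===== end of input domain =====

-- B replaces A's scatter pass into a mutated preallocated list by a tableless gather:
-- for each of the 81 cells, a backward scan of the solution for the last row hitting it
-- (alternative decomposition, not claimed faster).

-- ===== PORT A =====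
-- one loop iteration of A: board[row*9+col] = str(num); none = IndexError
def pvAStep (ob : Option (List String)) (r : Int) : Option (List String) :=
  ob.bind (fun board =>
    let row := PySem.Int.floordiv r 81
    let col := PySem.Int.floordiv (PySem.Int.mod r 81) 9
    let num := PySem.Int.mod r 9 + 1
    PySem.List.pySet? board (row * 9 + col) (PySem.Int.toStr num))

def exact_cover_to_sudoku (solution : List Int) : String :=
  match solution.foldl pvAStep (some (List.replicate 81 "0")) with
  | some board => PySem.Str.join "" board
  | none => ""   -- unreachable under Pre_ (A raises IndexError there)

-- ===== PORT B =====
-- B's inner helper 'digit(i)': scan reversed(solution) for the first r with r // 9 == i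
def pvBDigit (solution : List Int) (i : Int) : String :=
  match solution.reverse.find? (fun r => PySem.Int.floordiv r 9 == i) with
  | some r => PySem.Int.toStr (PySem.Int.mod r 9 + 1)
  | none => "0"

def exact_cover_to_sudoku_alt (solution : List Int) : String :=
  PySem.Str.join "" ((PySem.List.pyRange 0 81 1).map (pvBDigit solution))

-- ===== PRECONDITION & SPEC =====
-- Pre_ restricts the input to the function's natural domain, DLX row numbers 0..728: above
-- that range A raises IndexError, and on negative row numbers A's value comes from Python's
-- negative-index wraparound, a corner no caller of a Sudoku decoder supplies, where B simply
-- leaves the cells of such rows untouched.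
def Pre_exact_cover_to_sudoku (solution : List Int) : Prop :=
  ∀ r ∈ solution, 0 ≤ r ∧ r ≤ 728

instance (solution : List Int) : Decidable (Pre_exact_cover_to_sudoku solution) := by
  unfold Pre_exact_cover_to_sudoku; infer_instance

def pvWitness_exact_cover_to_sudoku : List Int := [0, 728]

def Spec_exact_cover_to_sudoku (solution : List Int) (out : String) : Prop :=
  out = exact_cover_to_sudoku_alt solution

instance (solution : List Int) (out : String) : Decidable (Spec_exact_cover_to_sudoku solution out) := by
  unfold Spec_exact_cover_to_sudoku; infer_instance

-- ===== CLAIM (what is proved, stated in full; the proofs are below) =====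
def Claim_equal_exact_cover_to_sudoku : Prop := ∀ (solution : List Int), Dom_exact_cover_to_sudoku solution → Pre_exact_cover_to_sudoku solution → Spec_exact_cover_to_sudoku solution (exact_cover_to_sudoku solution)

-- ===== LEMMAS AND PROOFS =====

-- arithmetic of A's index: for 0 ≤ r, (r//81)*9 + (r%81)//9 = r//9, and it lies in [0,81)
lemma pv_idx_eq (r : Int) (_h0 : 0 ≤ r) :
    PySem.Int.floordiv r 81 * 9 + PySem.Int.floordiv (PySem.Int.mod r 81) 9
      = PySem.Int.floordiv r 9 := by
  rw [PySem.Int.floordiv_eq_ediv_of_pos (by omega), PySem.Int.mod_eq_emod_of_pos (by omega),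
      PySem.Int.floordiv_eq_ediv_of_pos (by omega), PySem.Int.floordiv_eq_ediv_of_pos (by omega)]
  omega

lemma pv_idx_bounds (r : Int) (_h0 : 0 ≤ r) (h1 : r ≤ 728) :
    0 ≤ PySem.Int.floordiv r 9 ∧ PySem.Int.floordiv r 9 < 81 := by
  rw [PySem.Int.floordiv_eq_ediv_of_pos (by omega)]
  omega

-- loop invariant: A's Option-threaded board stays 'some', keeps length 81, and at each
-- index i holds the digit of the LAST row of sol hitting cell i (= the first match of
-- B's backward scan over sol), falling back to the incoming board's entry
lemma pv_loop (sol : List Int) : ∀ (board : List String),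
    (∀ r ∈ sol, 0 ≤ r ∧ r ≤ 728) →
    board.length = 81 →
    ∃ board', sol.foldl pvAStep (some board) = some board' ∧
      board'.length = 81 ∧
      (∀ i : Nat, i < 81 → board'.getD i "" =
        match sol.reverse.find? (fun r => PySem.Int.floordiv r 9 == (i : Int)) with
        | some x => PySem.Int.toStr (PySem.Int.mod x 9 + 1)
        | none => board.getD i "") := by
  induction sol with
  | nil => intro board _ hlen; exact ⟨board, rfl, hlen, by intro i _; simp⟩
  | cons r sol ih =>
    intro board hpre hlen
    have hr := hpre r (List.mem_cons_self ..)
    have hb := pv_idx_bounds r hr.1 hr.2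
    set k : Int := PySem.Int.floordiv r 9 with hk
    have hknat : k = ((k.toNat : Nat) : Int) := by omega
    have hkn : k.toNat < board.length := by omega
    have hstep : pvAStep (some board) r
        = some (board.set k.toNat (PySem.Int.toStr (PySem.Int.mod r 9 + 1))) := by
      simp only [pvAStep, Option.bind_some]
      rw [pv_idx_eq r hr.1, ← hk, hknat, PySem.List.pySet?_natCast _ _ _ hkn]
      rw [Int.toNat_natCast]
    simp only [List.foldl_cons, hstep]
    obtain ⟨board', hfold, hlen', hcorr⟩ :=
      ih (board.set k.toNat (PySem.Int.toStr (PySem.Int.mod r 9 + 1)))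
        (fun x hx => hpre x (List.mem_cons_of_mem _ hx)) (by simp [hlen])
    refine ⟨board', hfold, hlen', ?_⟩
    intro i hi
    rw [hcorr i hi, List.reverse_cons, List.find?_append]
    cases hfind : sol.reverse.find? (fun r => PySem.Int.floordiv r 9 == (i : Int)) with
    | some x => simp
    | none =>
      simp only [Option.none_or]
      have hset : (board.set k.toNat (PySem.Int.toStr (PySem.Int.mod r 9 + 1))).getD i ""
          = if k.toNat = i then PySem.Int.toStr (PySem.Int.mod r 9 + 1) else board.getD i "" := by
        by_cases h : k.toNat = i
        · subst h; simp [List.getD, hkn]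
        · simp [List.getD, List.getElem?_set_ne h, h]
      rw [hset]
      have hdiv : PySem.Int.floordiv r 9 = r / 9 := PySem.Int.floordiv_eq_ediv_of_pos (by omega)
      by_cases hik : k = (i : Int)
      · have hp : (r / 9 == (i : Int)) = true := by rw [← hdiv, ← hk, hik]; simp
        simp [List.find?, hp, if_pos (show k.toNat = i by omega)]
      · have hp : (r / 9 == (i : Int)) = false := by rw [← hdiv, ← hk]; simpa using hik
        simp [List.find?, hp, if_neg (show ¬ k.toNat = i by omega)]

-- ===== VERDICT (by name: the statement is the Claim_ definition above) =====
theorem exact_cover_to_sudoku_spec : Claim_equal_exact_cover_to_sudoku := by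
  intro solution _ hpos
  obtain ⟨board', hfold, hlen, hcorr⟩ :=
    pv_loop solution (List.replicate 81 "0") hpos (by simp)
  unfold Spec_exact_cover_to_sudoku
  have hjoin : exact_cover_to_sudoku solution = PySem.Str.join "" board' := by
    unfold exact_cover_to_sudoku
    rw [hfold]
  rw [hjoin]
  unfold exact_cover_to_sudoku_alt
  congr 1
  refine List.ext_getElem (by rw [hlen, List.length_map, PySem.List.length_pyRange_one]; decide) ?_
  intro i h1 h2
  have hi : i < 81 := by rw [hlen] at h1; exact h1
  have hthis := hcorr i hi
  rw [List.getD_eq_getElem?_getD, List.getElem?_eq_getElem h1] at hthis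
  simp only [Option.getD_some] at hthis
  rw [List.getElem_map, PySem.List.getElem_pyRange_one]
  simp only [zero_add]
  rw [hthis]
  unfold pvBDigit
  cases hfind : solution.reverse.find? (fun r => PySem.Int.floordiv r 9 == (i : Int)) with
  | some x => rfl
  | none =>
    rw [List.getD_eq_getElem?_getD, List.getElem?_replicate]
    simp [hi]
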